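-- pv_equiv track=rewrite | github.com/lonicram/Checkers | ai/checkers/engine.py | check_game_result
-- ===== SOURCE A (Python) =====
-- def check_game_result(state, get_white_number=False):
--     white = 0
--     black = 0
--     for row in state:
--         for field in row:
--             if field == 'pawn_white':
--                 white += 1
--             elif field == 'pawn_black':
--                 black += 1
--
--     if black == 0:
--         return 100
--     if white == 0:
--         return -100
--
--     if get_white_number:
--         return white
--     return 0
-- ===== SOURCE B (Python) =====
-- def check_game_result(state, get_white_number=False):
--     if not any(field == 'pawn_black' for row in state for field in row):
--         return 100
--     if not any(field == 'pawn_white' for row in state for field in row):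
--         return -100
--     if get_white_number:
--         return sum(row.count('pawn_white') for row in state)
--     return 0
-- ===== Notes on version B (the rewrite author's own statement) =====
-- stated objective: alternative
-- what changed: Replaces the single counting pass with two accumulators by staged short-circuiting existence checks (any) that decide the win codes directly, counting white pawns per row only in the branch that needs the number.
import Mathlib
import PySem

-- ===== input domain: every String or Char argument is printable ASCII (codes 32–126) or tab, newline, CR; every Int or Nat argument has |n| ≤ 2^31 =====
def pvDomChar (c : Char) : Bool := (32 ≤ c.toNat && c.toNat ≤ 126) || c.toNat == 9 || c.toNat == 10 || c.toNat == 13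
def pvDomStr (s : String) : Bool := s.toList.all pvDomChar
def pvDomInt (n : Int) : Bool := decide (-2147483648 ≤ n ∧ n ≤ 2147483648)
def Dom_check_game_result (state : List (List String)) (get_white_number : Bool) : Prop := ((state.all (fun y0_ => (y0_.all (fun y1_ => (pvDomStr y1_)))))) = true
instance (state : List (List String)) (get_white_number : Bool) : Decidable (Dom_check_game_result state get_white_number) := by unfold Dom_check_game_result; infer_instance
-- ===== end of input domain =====

-- B replaces A's single counting pass (two accumulators) by staged short-circuiting
-- existence checks that decide the win codes directly, counting white pawns only in
-- the branch that needs the number (alternative decomposition; same cost).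

-- ===== PORT A =====
-- nested for-loops with two integer accumulators, then the if-chain
def check_game_result (state : List (List String)) (get_white_number : Bool) : Int :=
  let wb : Int × Int := state.foldl
    (fun wb row => row.foldl
      (fun wb field =>
        if field = "pawn_white" then (wb.1 + 1, wb.2)
        else if field = "pawn_black" then (wb.1, wb.2 + 1)
        else wb) wb)
    (0, 0)
  if wb.2 = 0 then 100
  else if wb.1 = 0 then -100
  else if get_white_number then wb.1
  else 0

-- ===== PORT B =====
-- staged short-circuit existence checks; count white per row only when requested
def check_game_result_alt (state : List (List String)) (get_white_number : Bool) : Int :=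
  if ¬ state.any (fun row => row.any (fun field => field == "pawn_black")) then 100
  else if ¬ state.any (fun row => row.any (fun field => field == "pawn_white")) then -100
  else if get_white_number then
    ((state.map (fun row => (row.count "pawn_white" : Int))).sum)
  else 0

-- ===== PRECONDITION & SPEC =====
def Spec_check_game_result (state : List (List String)) (get_white_number : Bool) (out : Int) : Prop := out = check_game_result_alt state get_white_number
instance (state : List (List String)) (get_white_number : Bool) (out : Int) : Decidable (Spec_check_game_result state get_white_number out) := by unfold Spec_check_game_result; infer_instance

-- ===== CLAIM (what is proved, stated in full; the proofs are below) =====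
def Claim_equal_check_game_result : Prop := ∀ (state : List (List String)) (get_white_number : Bool), Dom_check_game_result state get_white_number → Spec_check_game_result state get_white_number (check_game_result state get_white_number)

-- ===== LEMMAS AND PROOFS =====

-- A's inner loop adds the row's counts of the two pawn strings to the accumulator
lemma inner_foldl_count (row : List String) (wb : Int × Int) :
    row.foldl
      (fun wb field =>
        if field = "pawn_white" then (wb.1 + 1, wb.2)
        else if field = "pawn_black" then (wb.1, wb.2 + 1)
        else wb) wb
    = (wb.1 + row.count "pawn_white", wb.2 + row.count "pawn_black") := by
  induction row generalizing wb with
  | nil => simp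
  | cons f t ih =>
    simp only [List.foldl_cons, ih, List.count_cons]
    by_cases hw : f = "pawn_white"
    · simp [hw]; omega
    · by_cases hb : f = "pawn_black"
      · simp [hb]; omega
      · simp [hw, hb]

-- A's nested loops compute the per-row count sums
lemma outer_foldl_count (state : List (List String)) :
    state.foldl
      (fun wb row => row.foldl
        (fun wb field =>
          if field = "pawn_white" then (wb.1 + 1, wb.2)
          else if field = "pawn_black" then (wb.1, wb.2 + 1)
          else wb) wb)
      ((0, 0) : Int × Int)
    = ((state.map (fun row => (row.count "pawn_white" : Int))).sum,
       (state.map (fun row => (row.count "pawn_black" : Int))).sum) := by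
  have key : ∀ (st : List (List String)) (wb : Int × Int),
      st.foldl
        (fun wb row => row.foldl
          (fun wb field =>
            if field = "pawn_white" then (wb.1 + 1, wb.2)
            else if field = "pawn_black" then (wb.1, wb.2 + 1)
            else wb) wb) wb
      = (wb.1 + (st.map (fun row => (row.count "pawn_white" : Int))).sum,
         wb.2 + (st.map (fun row => (row.count "pawn_black" : Int))).sum) := by
    intro st
    induction st with
    | nil => simp
    | cons r t ih =>
      intro wb
      rw [List.foldl_cons, inner_foldl_count, ih]
      refine Prod.ext ?_ ?_ <;> simp <;> ring
  simpa using key state (0, 0)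

-- the per-row count sum is zero iff no row contains the string
lemma sum_count_eq_zero_iff (state : List (List String)) (s : String) :
    (state.map (fun row => (row.count s : Int))).sum = 0 ↔
      ¬ state.any (fun row => row.any (fun field => field == s)) := by
  induction state with
  | nil => simp
  | cons r t ih =>
    have h1 : (0 : Int) ≤ (r.count s : Int) := Int.natCast_nonneg _
    have h2 : (0 : Int) ≤ (t.map (fun row => (row.count s : Int))).sum := by
      apply List.sum_nonneg
      intro x hx
      simp only [List.mem_map] at hx
      obtain ⟨a, _, ha⟩ := hx
      simp [← ha]
    have hsplit : (r.count s : Int) + (t.map (fun row => (row.count s : Int))).sum = 0 ↔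
        (r.count s : Int) = 0 ∧ (t.map (fun row => (row.count s : Int))).sum = 0 := by omega
    simp only [List.map_cons, List.sum_cons, List.any_cons, Bool.or_eq_true, not_or, hsplit, ih]
    simp [Int.natCast_eq_zero, List.count_eq_zero, List.any_eq_true]

-- ===== VERDICT (by name: the statement is the Claim_ definition above) =====
theorem check_game_result_spec : Claim_equal_check_game_result := by
  intro state g _
  unfold Spec_check_game_result check_game_result check_game_result_alt
  simp only [outer_foldl_count]
  by_cases hb : (state.map (fun row => (row.count "pawn_black" : Int))).sum = 0
  · rw [if_pos hb, if_pos ((sum_count_eq_zero_iff state "pawn_black").mp hb)]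
  · rw [if_neg hb, if_neg (fun h => hb ((sum_count_eq_zero_iff state "pawn_black").mpr h))]
    by_cases hw : (state.map (fun row => (row.count "pawn_white" : Int))).sum = 0
    · rw [if_pos hw, if_pos ((sum_count_eq_zero_iff state "pawn_white").mp hw)]
    · rw [if_neg hw, if_neg (fun h => hw ((sum_count_eq_zero_iff state "pawn_white").mpr h))]
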